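-- pv_equiv track=rewrite | github.com/pypi-data/pypi-mirror-398 | packages/doc-store/doc_store-0.7.0-py3-none-any.whl/doc_store/oid.py | _encode_int
-- ===== SOURCE A (Python) =====
-- _enc_chars = sorted("ABCDEFGHIJKLMNOPQRSTUVWXYZabcdefghijklmnopqrstuvwxyz0123456789-_")
--
-- def _encode_int(v: int, byte_len: int) -> str:
--     bits = v
--     bit_len = byte_len * 8
--     res = []
--     while bit_len >= 6:
--         bit_len -= 6
--         idx = (bits >> bit_len) & 0x3F
--         res.append(_enc_chars[idx])
--     if bit_len > 0:
--         idx = (bits << (6 - bit_len)) & 0x3F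
--         res.append(_enc_chars[idx])
--     return "".join(res)
-- ===== SOURCE B (Python) =====
-- _enc_chars = sorted("ABCDEFGHIJKLMNOPQRSTUVWXYZabcdefghijklmnopqrstuvwxyz0123456789-_")
--
-- def _encode_int(v: int, byte_len: int) -> str:
--     total = byte_len * 8
--     if total <= 0:
--         return ""
--     shift = (6 - total % 6) % 6
--     w = v << shift
--     n = (total + shift) // 6
--     res = []
--     for _ in range(n):
--         res.append(_enc_chars[w & 0x3F])
--         w >>= 6
--     return "".join(reversed(res))
-- ===== Notes on version B (the rewrite author's own statement) =====
-- stated objective: alternative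
-- what changed: A walks the bit positions high-to-low, recomputing bits >> bit_len with a large decreasing shift each iteration and ending in a special final-partial-group branch; B left-pads v to a whole number of 6-bit groups once, then peels groups from the LOW end (w & 0x3F; w >>= 6) a precomputed number of times and reverses, with no special case.
import Mathlib
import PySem

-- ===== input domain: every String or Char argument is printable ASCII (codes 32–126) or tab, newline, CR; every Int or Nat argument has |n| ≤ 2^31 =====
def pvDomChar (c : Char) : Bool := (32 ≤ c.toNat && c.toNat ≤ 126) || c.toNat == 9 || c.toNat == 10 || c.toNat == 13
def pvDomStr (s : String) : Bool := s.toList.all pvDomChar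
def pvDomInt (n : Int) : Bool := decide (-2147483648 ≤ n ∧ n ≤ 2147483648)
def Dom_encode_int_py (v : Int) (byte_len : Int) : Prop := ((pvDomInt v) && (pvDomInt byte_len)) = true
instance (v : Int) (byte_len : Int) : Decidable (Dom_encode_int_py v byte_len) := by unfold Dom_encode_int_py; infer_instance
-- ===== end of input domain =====

-- B re-decomposes A's high-to-low chunk loop: it left-pads v to a whole number of 6-bit groups once,
-- peels groups from the LOW end a precomputed number of times, and reverses — no special final branch.

-- ===== PORT A =====
-- _enc_chars = sorted("ABC…-_") : module-level constant shared by both versions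
def pvEncChars : List Char :=
  PySem.List.sorted ("ABCDEFGHIJKLMNOPQRSTUVWXYZabcdefghijklmnopqrstuvwxyz0123456789-_".toList) (fun c => c) false

-- _enc_chars[idx]; every index used is in [0, 64) so the default is never taken
def pvEncGet (idx : Int) : Char := (PySem.List.pyGet? pvEncChars idx).getD 'A'

-- the while-loop of A; `bits >> k` is floor division by 2^k (exact for negative bits), `& 0x3F` is `% 64` (floor mod, exact)
def pvLoopA (bits : Int) (bit_len : Int) (res : List Char) : List Char × Int :=
  if 6 ≤ bit_len then
    pvLoopA bits (bit_len - 6)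
      (res ++ [pvEncGet (PySem.Int.mod (PySem.Int.floordiv bits (2 ^ (bit_len - 6).toNat)) 64)])
  else (res, bit_len)
termination_by bit_len.toNat
decreasing_by omega

def encode_int_py (v : Int) (byte_len : Int) : String :=
  let p := pvLoopA v (byte_len * 8) []
  String.mk (if 0 < p.2 then p.1 ++ [pvEncGet (PySem.Int.mod (v * 2 ^ ((6:Int) - p.2).toNat) 64)] else p.1)

-- ===== PORT B =====
-- the for-loop of B: peel the low 6 bits n times (`w & 0x3F` = `% 64`, `w >>= 6` = `//= 64`)
def pvLoopB (w : Int) (n : Nat) (res : List Char) : List Char :=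
  match n with
  | 0 => res
  | Nat.succ m => pvLoopB (PySem.Int.floordiv w 64) m (res ++ [pvEncGet (PySem.Int.mod w 64)])

def encode_int_py_alt (v : Int) (byte_len : Int) : String :=
  let total := byte_len * 8
  if total ≤ 0 then "" else
    let shift := PySem.Int.mod (6 - PySem.Int.mod total 6) 6
    -- `v << shift` is v * 2^shift
    let w := v * 2 ^ shift.toNat
    let n := PySem.Int.floordiv (total + shift) 6
    String.mk (pvLoopB w n.toNat []).reverse

-- ===== PRECONDITION & SPEC =====
def Spec_encode_int_py (v : Int) (byte_len : Int) (out : String) : Prop := out = encode_int_py_alt v byte_len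
instance (v : Int) (byte_len : Int) (out : String) : Decidable (Spec_encode_int_py v byte_len out) := by unfold Spec_encode_int_py; infer_instance

-- ===== CLAIM (what is proved, stated in full; the proofs are below) =====
def Claim_equal_encode_int_py : Prop := ∀ (v : Int) (byte_len : Int), Dom_encode_int_py v byte_len → Spec_encode_int_py v byte_len (encode_int_py v byte_len)

-- ===== LEMMAS AND PROOFS =====

lemma pvLoopA_stop (bits bl : Int) (res : List Char) (h : ¬ 6 ≤ bl) :
    pvLoopA bits bl res = (res, bl) := by
  unfold pvLoopA; rw [if_neg h]

lemma pow2_pos (k : Nat) : (0:Int) < 2 ^ k := by positivity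

-- A's loop, characterized: it appends the 6-bit chunks of `bits` from high to low
lemma pvLoopA_eq (q : Nat) : ∀ (bits : Int) (t : Nat) (res : List Char), t / 6 = q →
    pvLoopA bits (t : Int) res =
      (res ++ (List.range q).map (fun i => pvEncGet ((bits / 2 ^ (t - 6*(i+1))) % 64)),
       ((t % 6 : Nat) : Int)) := by
  induction q with
  | zero =>
    intro bits t res hq
    rw [pvLoopA_stop _ _ _ (by exact_mod_cast (by omega : ¬ (6:Int) ≤ (t:Int)))]
    simp only [List.range_zero, List.map_nil, List.append_nil, Prod.mk.injEq, true_and]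
    omega
  | succ p ih =>
    intro bits t res hq
    have h6 : 6 ≤ t := by omega
    unfold pvLoopA
    rw [if_pos (show (6:Int) ≤ (t:Int) by exact_mod_cast h6)]
    have e1 : ((t:Int) - 6) = ((t - 6 : Nat) : Int) := by omega
    rw [e1, Int.toNat_natCast]
    rw [ih bits (t-6) _ (by omega)]
    rw [PySem.Int.floordiv_eq_ediv_of_pos (pow2_pos _),
        PySem.Int.mod_eq_emod_of_pos (by norm_num)]
    simp only [Prod.mk.injEq]
    refine ⟨?_, by omega⟩
    rw [List.append_assoc]
    congr 1
    rw [List.range_succ_eq_map, List.map_cons, List.map_map, List.singleton_append]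
    refine List.cons_eq_cons.mpr ⟨by norm_num, ?_⟩
    apply List.map_congr_left
    intro i hi
    simp only [Function.comp_apply]
    have e2 : t - 6 - 6 * (i + 1) = t - 6 * (i + 1 + 1) := by omega
    rw [e2]

-- B's loop, characterized: it appends the 6-bit chunks of `w` from low to high
lemma pvLoopB_eq (n : Nat) : ∀ (w : Int) (res : List Char),
    pvLoopB w n res = res ++ (List.range n).map (fun i => pvEncGet ((w / 2 ^ (6*i)) % 64)) := by
  induction n with
  | zero => intro w res; simp [pvLoopB]
  | succ m ih =>
    intro w res
    show pvLoopB (PySem.Int.floordiv w 64) m (res ++ [pvEncGet (PySem.Int.mod w 64)]) = _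
    rw [ih, PySem.Int.floordiv_eq_ediv_of_pos (by norm_num),
        PySem.Int.mod_eq_emod_of_pos (by norm_num)]
    rw [List.append_assoc]
    congr 1
    rw [List.range_succ_eq_map, List.map_cons, List.map_map, List.singleton_append]
    refine List.cons_eq_cons.mpr ⟨by norm_num, ?_⟩
    apply List.map_congr_left
    intro i hi
    simp only [Function.comp_apply]
    rw [Int.ediv_ediv_of_nonneg (show (0:Int) ≤ 64 by norm_num)]
    rw [show ((64:Int) * 2 ^ (6*i)) = 2 ^ (6 * (i + 1)) by
      rw [show 6 * (i+1) = 6 + 6*i by ring, pow_add]; norm_num]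

lemma rev_map_range (n : Nat) (f : Nat → Char) :
    ((List.range n).map f).reverse = (List.range n).map (fun j => f (n-1-j)) := by
  apply List.ext_getElem (by simp)
  intro j h1 h2
  simp only [List.getElem_reverse, List.getElem_map, List.getElem_range,
    List.length_map, List.length_range] at *

theorem encode_int_eq (v b : Int) : encode_int_py v b = encode_int_py_alt v b := by
  by_cases h0 : b * 8 ≤ 0
  · simp only [encode_int_py, encode_int_py_alt]
    rw [pvLoopA_stop _ _ _ (by omega), if_pos h0]
    norm_num
    rw [if_neg (show ¬ (0:Int) < b by omega)]
    rfl
  · obtain ⟨t, ht, htpos⟩ : ∃ t : Nat, (b * 8 : Int) = (t : Int) ∧ 0 < t :=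
      ⟨(b*8).toNat, by omega, by omega⟩
    simp only [encode_int_py, encode_int_py_alt]
    rw [ht, if_neg (show ¬ (t:Int) ≤ 0 by omega)]
    rw [pvLoopA_eq (t/6) v t [] rfl]
    simp only [List.nil_append]
    have hm1 : PySem.Int.mod (t:Int) 6 = ((t % 6 : Nat) : Int) := by
      rw [PySem.Int.mod_eq_emod_of_pos (by norm_num)]; omega
    rw [hm1]
    have h56 : t % 6 < 6 := Nat.mod_lt _ (by norm_num)
    have hm2 : PySem.Int.mod (6 - ((t % 6 : Nat):Int)) 6 = (((6 - t % 6) % 6 : Nat) : Int) := by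
      rw [PySem.Int.mod_eq_emod_of_pos (by norm_num)]; omega
    rw [hm2, Int.toNat_natCast]
    have hfd : PySem.Int.floordiv ((t:Int) + (((6 - t % 6) % 6 : Nat):Int)) 6
        = (((t + (6 - t % 6) % 6) / 6 : Nat) : Int) := by
      rw [PySem.Int.floordiv_eq_ediv_of_pos (by norm_num)]; omega
    rw [hfd, Int.toNat_natCast]
    rw [pvLoopB_eq _ _ [], List.nil_append, rev_map_range]
    by_cases hr0 : t % 6 = 0
    · rw [if_neg (show ¬ (0:Int) < ((t % 6 : Nat):Int) by omega)]
      congr 1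
      have hs0 : (6 - t % 6) % 6 = 0 := by omega
      rw [hs0, Nat.add_zero, pow_zero, mul_one]
      apply List.map_congr_left
      intro i hi
      rw [List.mem_range] at hi
      rw [show 6 * (t / 6 - 1 - i) = t - 6 * (i + 1) by omega]
    · rw [if_pos (show (0:Int) < ((t % 6 : Nat):Int) by omega)]
      have hs : (6 - t % 6) % 6 = 6 - t % 6 := Nat.mod_eq_of_lt (by omega)
      rw [show ((6:Int) - ((t % 6 : Nat):Int)).toNat = 6 - t % 6 by omega]
      rw [PySem.Int.mod_eq_emod_of_pos (by norm_num)]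
      rw [hs]
      congr 1
      rw [show (t + (6 - t % 6)) / 6 = t / 6 + 1 by omega]
      rw [List.range_succ, List.map_append]
      congr 1
      · apply List.map_congr_left
        intro i hi
        rw [List.mem_range] at hi
        rw [show 6 * (t / 6 + 1 - 1 - i) = (6 - t % 6) + (t - 6 * (i + 1)) by omega]
        rw [pow_add, show (v * 2 ^ (6 - t % 6)) = 2 ^ (6 - t % 6) * v by ring]
        rw [Int.mul_ediv_mul_of_pos _ _ (pow2_pos _)]
      · simp only [List.map_cons, List.map_nil]
        rw [show 6 * (t / 6 + 1 - 1 - t / 6) = 0 by omega, pow_zero, Int.ediv_one]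

-- ===== VERDICT (by name: the statement is the Claim_ definition above) =====
theorem encode_int_py_spec : Claim_equal_encode_int_py := by
  intro v byte_len _
  unfold Spec_encode_int_py
  exact encode_int_eq v byte_len
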